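-- pv_equiv track=rewrite | github.com/SanwaySarkar/TestingAutomatioWithAgent | arithmetic_engine.py | fuzzy_col
-- ===== SOURCE A (Python) =====
-- def fuzzy_col(token: str, cols: list[str]) -> str | None:
--     """
--     Match a token extracted from rule text to the closest actual input column.
--     Handles case differences, whitespace, underscores, and common typos
--     (e.g. 'brokerage' matches column 'Brokergage').
--     """
--     if not token:
--         return None
--     t = token.strip().lower().replace(' ', '').replace('_', '')
--     # Ignore placeholder words that mean "use previous result"
--     if t in ('result', 'value', 'it', 'that', ''):
--         return None
--     # Exact normalised match
--     for col in cols: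
--         if col.lower().replace(' ', '').replace('_', '') == t:
--             return col
--     # Substring match (either direction)
--     for col in cols:
--         c = col.lower().replace(' ', '').replace('_', '')
--         if c in t or t in c:
--             return col
--     # Synonym / typo table
--     syns = {'brokerage': 'brokergage', 'brokergage': 'brokerage',
--             'fee': 'brokergage', 'charge': 'brokergage'}
--     alt = syns.get(t)
--     if alt:
--         for col in cols:
--             if alt in col.lower().replace(' ', '').replace('_', ''):
--                 return col
--     return None
-- ===== SOURCE B (Python) =====
-- def fuzzy_col(token: str, cols: list[str]) -> str | None:
--     """Rank-and-select: score every column once on a 0-3 scale (0 exact, 1 substring,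
--     2 synonym/typo target, 3 no match) and return the best-ranked column, earliest
--     position winning ties, found by one backwards sweep keeping the current best."""
--     if not token:
--         return None
--     t = token.strip().lower().replace(' ', '').replace('_', '')
--     if t in ('result', 'value', 'it', 'that', ''):
--         return None
--     alt = {'brokerage': 'brokergage', 'brokergage': 'brokerage',
--            'fee': 'brokergage', 'charge': 'brokergage'}.get(t)
--
--     def rank(col):
--         c = col.lower().replace(' ', '').replace('_', '')
--         if c == t:
--             return 0
--         if c in t or t in c:
--             return 1
--         if alt and alt in c:
--             return 2
--         return 3
--
--     best = None  # (rank, col) with the earliest column of the best rank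
--     for col in reversed(cols):
--         r = rank(col)
--         if best is None or r <= best[0]:
--             best = (r, col)
--     if best is None or best[0] == 3:
--         return None
--     return best[1]
-- ===== Notes on version B (the rewrite author's own statement) =====
-- stated objective: alternative
-- what changed: A's three sequential scans with early returns (exact pass, substring pass, synonym pass) are replaced by a single 0-3 ranking function applied once per column and an argmin-style selection over (rank, position) performed in one backwards sweep; the priority order lives in the numeric rank, not in staged control flow.
import Mathlib
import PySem

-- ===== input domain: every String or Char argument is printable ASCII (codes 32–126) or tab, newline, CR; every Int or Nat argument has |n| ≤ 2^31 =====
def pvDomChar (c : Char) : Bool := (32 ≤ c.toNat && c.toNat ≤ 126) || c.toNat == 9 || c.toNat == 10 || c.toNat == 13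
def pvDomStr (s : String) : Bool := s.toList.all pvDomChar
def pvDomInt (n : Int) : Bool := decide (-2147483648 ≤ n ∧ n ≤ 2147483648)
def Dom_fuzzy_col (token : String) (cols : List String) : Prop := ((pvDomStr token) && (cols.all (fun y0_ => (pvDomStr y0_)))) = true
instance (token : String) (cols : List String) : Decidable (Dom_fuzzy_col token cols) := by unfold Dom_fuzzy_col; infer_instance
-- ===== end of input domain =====

-- B replaces A's three staged scans (exact, substring, synonym) by a 0-3 ranking function per
-- column and an argmin over (rank, position) done in one backwards sweep (alternative, same cost).


-- ===== PORT A =====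
-- normalisation appearing in both Pythons: col.lower().replace(' ','').replace('_','')
def pvNormCol (s : String) : List Char :=
  PySem.Chars.replace (PySem.Chars.replace (PySem.Chars.lower s.toList) [' '] []) ['_'] []

-- token.strip().lower().replace(' ','').replace('_','')
def pvNormTok (s : String) : List Char :=
  PySem.Chars.replace (PySem.Chars.replace (PySem.Chars.lower (PySem.Chars.strip s.toList)) [' '] []) ['_'] []

def pvSyns : PySem.Dict (List Char) (List Char) :=
  PySem.Dict.ofList [("brokerage".toList, "brokergage".toList),
                     ("brokergage".toList, "brokerage".toList),
                     ("fee".toList, "brokergage".toList),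
                     ("charge".toList, "brokergage".toList)]

def fuzzy_col (token : String) (cols : List String) : Option String :=
  if token = "" then none
  else
    let t := pvNormTok token
    if t = "result".toList ∨ t = "value".toList ∨ t = "it".toList ∨ t = "that".toList ∨ t = [] then
      none
    else
      -- exact normalised match
      match cols.find? (fun col => pvNormCol col == t) with
      | some col => some col
      | none =>
        -- substring match (either direction)
        match cols.find? (fun col =>
            PySem.Chars.isIn (pvNormCol col) t || PySem.Chars.isIn t (pvNormCol col)) with
        | some col => some col
        | none =>
          -- synonym / typo table
          match PySem.Dict.get? pvSyns t with
          | none => none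
          | some alt =>
            if alt = [] then none
            else cols.find? (fun col => PySem.Chars.isIn alt (pvNormCol col))

-- ===== PORT B =====
-- Source B's rank(col): 0 exact, 1 substring either direction, 2 synonym target, 3 no match
def pvRank (t : List Char) (alt : Option (List Char)) (col : String) : Nat :=
  if pvNormCol col = t then 0
  else if PySem.Chars.isIn (pvNormCol col) t || PySem.Chars.isIn t (pvNormCol col) then 1
  else if (match alt with
           | none => false
           | some a => !(a == []) && PySem.Chars.isIn a (pvNormCol col)) then 2
  else 3

-- Source B's backwards sweep: 'for col in reversed(cols): if best is None or r <= best[0]: best = (r, col)'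
def pvBest (r : String → Nat) (cols : List String) : Option (Nat × String) :=
  cols.reverse.foldl (fun best col =>
    match best with
    | none => some (r col, col)
    | some p => if r col ≤ p.1 then some (r col, col) else p) none

def fuzzy_col_alt (token : String) (cols : List String) : Option String :=
  if token = "" then none
  else
    let t := pvNormTok token
    if t = "result".toList ∨ t = "value".toList ∨ t = "it".toList ∨ t = "that".toList ∨ t = [] then
      none
    else
      match pvBest (pvRank t (PySem.Dict.get? pvSyns t)) cols with
      | none => none
      | some p => if p.1 == 3 then none else some p.2

-- ===== PRECONDITION & SPEC =====
def Spec_fuzzy_col (token : String) (cols : List String) (out : Option String) : Prop := out = fuzzy_col_alt token cols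
instance (token : String) (cols : List String) (out : Option String) : Decidable (Spec_fuzzy_col token cols out) := by unfold Spec_fuzzy_col; infer_instance

-- ===== CLAIM (what is proved, stated in full; the proofs are below) =====
def Claim_equal_fuzzy_col : Prop := ∀ (token : String) (cols : List String), Dom_fuzzy_col token cols → Spec_fuzzy_col token cols (fuzzy_col token cols)

-- ===== LEMMAS AND PROOFS =====

theorem pvRank_le_3 (t : List Char) (alt : Option (List Char)) (col : String) :
    pvRank t alt col ≤ 3 := by
  unfold pvRank; split_ifs <;> omega

theorem pvBest_cons (r : String → Nat) (x : String) (xs : List String) :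
    pvBest r (x :: xs) =
      (match pvBest r xs with
       | none => some (r x, x)
       | some p => if r x ≤ p.1 then some (r x, x) else p) := by
  simp [pvBest, List.reverse_cons, List.foldl_append]

-- the backwards sweep computes the staged-scan result, with the winning rank attached
theorem pvBest_stage (r : String → Nat) (h3 : ∀ x, r x ≤ 3) (cols : List String) :
    pvBest r cols =
      match cols.find? (fun x => r x == 0) with
      | some c => some (0, c)
      | none =>
        match cols.find? (fun x => r x == 1) with
        | some c => some (1, c)
        | none =>
          match cols.find? (fun x => r x == 2) with
          | some c => some (2, c)
          | none =>
            match cols.find? (fun x => r x == 3) with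
            | some c => some (3, c)
            | none => none := by
  induction cols with
  | nil => rfl
  | cons x xs ih =>
    rw [pvBest_cons, ih]
    have hx := h3 x
    simp only [List.find?_cons]
    interval_cases h : r x
    · split <;> rfl
    · cases hf0 : xs.find? (fun y => r y == 0) with
      | some c => simp
      | none =>
        cases hf1 : xs.find? (fun y => r y == 1) with
        | some c => simp
        | none =>
          cases hf2 : xs.find? (fun y => r y == 2) with
          | some c => simp
          | none =>
            cases hf3 : xs.find? (fun y => r y == 3) with
            | some c => simp
            | none => simp
    · cases hf0 : xs.find? (fun y => r y == 0) with
      | some c => simp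
      | none =>
        cases hf1 : xs.find? (fun y => r y == 1) with
        | some c => simp
        | none =>
          cases hf2 : xs.find? (fun y => r y == 2) with
          | some c => simp
          | none =>
            cases hf3 : xs.find? (fun y => r y == 3) with
            | some c => simp
            | none => simp
    · cases hf0 : xs.find? (fun y => r y == 0) with
      | some c => simp
      | none =>
        cases hf1 : xs.find? (fun y => r y == 1) with
        | some c => simp
        | none =>
          cases hf2 : xs.find? (fun y => r y == 2) with
          | some c => simp
          | none =>
            cases hf3 : xs.find? (fun y => r y == 3) with
            | some c => simp
            | none => simp

theorem find?_congr_mem {α : Type} (l : List α) (p q : α → Bool)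
    (h : ∀ x ∈ l, p x = q x) : l.find? p = l.find? q := by
  induction l with
  | nil => rfl
  | cons x xs ih =>
    simp only [List.find?_cons, h x (by simp)]
    split <;> simp_all

-- ===== VERDICT (by name: the statement is the Claim_ definition above) =====
theorem fuzzy_col_spec : Claim_equal_fuzzy_col := by
  intro token cols _
  unfold Spec_fuzzy_col fuzzy_col fuzzy_col_alt
  by_cases h1 : token = ""
  · simp [h1]
  · simp only [h1, if_false]
    set t := pvNormTok token with ht
    by_cases h2 : t = "result".toList ∨ t = "value".toList ∨ t = "it".toList ∨ t = "that".toList ∨ t = []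
    · simp only [h2, if_true]
    · simp only [h2, if_false]
      rw [pvBest_stage (pvRank t (PySem.Dict.get? pvSyns t))
            (fun x => pvRank_le_3 t (PySem.Dict.get? pvSyns t) x) cols]
      -- stage 0: exact match
      have e0 : cols.find? (fun x => pvRank t (PySem.Dict.get? pvSyns t) x == 0)
          = cols.find? (fun col => pvNormCol col == t) := by
        apply find?_congr_mem; intro x _
        unfold pvRank; split_ifs <;> simp_all
      rw [e0]
      cases hf0 : cols.find? (fun col => pvNormCol col == t) with
      | some c => simp
      | none =>
        have hm0 : ∀ x ∈ cols, ¬ (pvNormCol x = t) := by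
          intro x hx
          simpa using List.find?_eq_none.mp hf0 x hx
        -- stage 1: substring match
        have e1 : cols.find? (fun x => pvRank t (PySem.Dict.get? pvSyns t) x == 1)
            = cols.find? (fun col =>
                PySem.Chars.isIn (pvNormCol col) t || PySem.Chars.isIn t (pvNormCol col)) := by
          apply find?_congr_mem; intro x hx
          unfold pvRank
          simp only [hm0 x hx, if_false]
          split_ifs <;> simp_all
        rw [e1]
        cases hf1 : cols.find? (fun col =>
            PySem.Chars.isIn (pvNormCol col) t || PySem.Chars.isIn t (pvNormCol col)) with
        | some c => simp
        | none =>
          have hm1 : ∀ x ∈ cols, PySem.Chars.isIn (pvNormCol x) t = false ∧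
              PySem.Chars.isIn t (pvNormCol x) = false := by
            intro x hx
            simpa using List.find?_eq_none.mp hf1 x hx
          -- stage 2: synonym table
          cases hA : PySem.Dict.get? pvSyns t with
          | none =>
            have h2n : cols.find? (fun x => pvRank t none x == 2) = none := by
              apply List.find?_eq_none.mpr
              intro x _
              unfold pvRank; split_ifs <;> simp_all
            rw [h2n]
            cases hf3 : cols.find? (fun x => pvRank t none x == 3) <;> simp
          | some a =>
            by_cases ha : a = []
            · have h2n : cols.find? (fun x => pvRank t (some a) x == 2) = none := by
                apply List.find?_eq_none.mpr
                intro x _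
                unfold pvRank; split_ifs <;> simp_all
              rw [h2n]
              cases hf3 : cols.find? (fun x => pvRank t (some a) x == 3) <;> simp [ha]
            · have e2 : cols.find? (fun x => pvRank t (some a) x == 2)
                  = cols.find? (fun col => PySem.Chars.isIn a (pvNormCol col)) := by
                apply find?_congr_mem; intro x hx
                unfold pvRank
                simp only [hm0 x hx, if_false, (hm1 x hx).1, (hm1 x hx).2]
                split_ifs <;> simp_all
              rw [e2]
              cases hf2 : cols.find? (fun col => PySem.Chars.isIn a (pvNormCol col)) with
              | some c => simp [ha, hf2]
              | none =>
                cases hf3 : cols.find? (fun x => pvRank t (some a) x == 3) <;> simp [ha, hf2]
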